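-- pv_equiv track=rewrite | github.com/digital-cube/edu | projecteuler/igor/igor-03.py | max_factor
-- ===== SOURCE A (Python) =====
-- import math
--
-- def is_prime(x):
--
--     if x == 1 or x % 2 == 0:
--         return False
--
--     if x in [2, 3]:
--         return True
--
--     for i in range(3,int(math.sqrt(x))+1):
--         if x % i == 0:
--             return False
--
--     return True
--
-- def next_prime(number):
--
--     while True:
--         number += 1
--         if is_prime(number):
--             return number
--
-- def max_factor(number):
--
--     factors = []
--
--     prime = 2
--
--     while number>1:
--         while number % prime == 0:
--             factors.append(prime)
--             number = number // prime
--
--         prime = next_prime(prime)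
--
--     return factors[-1]
-- ===== SOURCE B (Python) =====
-- def max_factor(number):
--     largest = 1
--     i = 2
--     while i * i <= number:
--         if number % i == 0:
--             largest = i
--             number //= i
--         else:
--             i += 1
--     return number if number > 1 else largest
-- ===== Notes on version B (the rewrite author's own statement) =====
-- stated objective: faster
-- what changed: replaced prime-by-prime division (each next prime found by an O(sqrt p) primality scan) with plain trial division by every i up to sqrt(n), dividing factors out, so no primality test and the scan stops at sqrt of the remaining cofactor instead of running up to the largest prime factor itself
import Mathlib
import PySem

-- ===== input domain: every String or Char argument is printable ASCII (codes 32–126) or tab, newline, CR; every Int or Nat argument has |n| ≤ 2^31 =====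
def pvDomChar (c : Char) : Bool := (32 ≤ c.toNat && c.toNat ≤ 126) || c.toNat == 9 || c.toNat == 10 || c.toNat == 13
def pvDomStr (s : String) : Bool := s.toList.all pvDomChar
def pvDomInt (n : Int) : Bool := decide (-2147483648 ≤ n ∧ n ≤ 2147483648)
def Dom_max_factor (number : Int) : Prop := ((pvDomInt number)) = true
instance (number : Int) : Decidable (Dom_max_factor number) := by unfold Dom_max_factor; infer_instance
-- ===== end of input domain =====

-- B replaces A's prime-by-prime division (each next prime found by a primality scan) with plain
-- trial division by every i up to sqrt of the remaining cofactor: objective 'faster'.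


-- ===== PORT A =====
-- int(math.sqrt(x)) is ported as Nat.sqrt: exact for the arguments reached here (0 ≤ x ≤ 2^31 < 2^52).
def is_prime (x : Int) : Bool :=
  if x = 1 ∨ PySem.Int.mod x 2 = 0 then false
  else if x = 2 ∨ x = 3 then true
  else if (PySem.List.pyRange 3 ((x.toNat.sqrt : Int) + 1) 1).any
            (fun i => PySem.Int.mod x i == 0) then false
  else true

-- 'while True' of next_prime with a fuel bound; the fuel is proved sufficient (via Bertrand's
-- postulate) for every argument reached from max_factor, so the fuel-0 value is inert.
def nextPrimeLoop : Nat → Int → Int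
  | 0, number => number + 1
  | f+1, number => if is_prime (number + 1) then number + 1 else nextPrimeLoop f (number + 1)

def next_prime (number : Int) : Int := nextPrimeLoop (number.toNat + 1) number

-- inner 'while number % prime == 0' (fuel number.toNat suffices: number strictly decreases)
def divideOut : Nat → Int → Int → List Int → Int × List Int
  | 0, number, _, factors => (number, factors)
  | f+1, number, prime, factors =>
    if PySem.Int.mod number prime == 0 then
      divideOut f (PySem.Int.floordiv number prime) prime (factors ++ [prime])
    else (number, factors)

-- outer 'while number > 1' (fuel number.toNat + 2 is proved sufficient below)
def maxLoop : Nat → Int → Int → List Int → List Int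
  | 0, _, _, factors => factors
  | f+1, number, prime, factors =>
    if number > 1 then
      let r := divideOut number.toNat number prime factors
      maxLoop f r.1 (next_prime prime) r.2
    else factors

def max_factor (number : Int) : Int :=
  let factors := maxLoop (number.toNat + 2) number 2 []
  (PySem.List.pyGet? factors (-1)).getD 0   -- factors[-1]; IndexError (empty list) excluded by Pre_

-- ===== PORT B =====
-- 'while i*i <= number' trial division (fuel number.toNat + 2 is proved sufficient below;
-- if fuel 0 were reached the loop guard would already be false, so it returns the exit value)
def altLoop : Nat → Int → Int → Int → Int
  | 0, number, _, largest => if number > 1 then number else largest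
  | f+1, number, i, largest =>
    if i * i ≤ number then
      if PySem.Int.mod number i == 0 then
        altLoop f (PySem.Int.floordiv number i) i i
      else altLoop f number (i + 1) largest
    else if number > 1 then number else largest

def max_factor_alt (number : Int) : Int := altLoop (number.toNat + 2) number 2 1

-- ===== PRECONDITION & SPEC =====
-- A raises IndexError (factors[-1] on the empty list) for number < 2, so Pre_ is 2 ≤ number.
def Pre_max_factor (number : Int) : Prop := 2 ≤ number
instance (number : Int) : Decidable (Pre_max_factor number) := by unfold Pre_max_factor; infer_instance

def pvWitness_max_factor : Int := 12

def Spec_max_factor (number : Int) (out : Int) : Prop := out = max_factor_alt number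
instance (number : Int) (out : Int) : Decidable (Spec_max_factor number out) := by unfold Spec_max_factor; infer_instance

-- ===== CLAIM (what is proved, stated in full; the proofs are below) =====
def Claim_equal_max_factor : Prop := ∀ (number : Int), Dom_max_factor number → Pre_max_factor number → Spec_max_factor number (max_factor number)

-- ===== LEMMAS AND PROOFS =====

-- the common mathematical value of both programs: the largest prime factor
def maxPF (n : Nat) : Nat := n.primeFactors.max.getD 1

lemma maxPF_mem {n : Nat} (hn : 2 ≤ n) : maxPF n ∈ n.primeFactors := by
  have hne : n.primeFactors.Nonempty := Nat.nonempty_primeFactors.mpr (by omega)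
  obtain ⟨M, hM⟩ := Finset.max_of_nonempty hne
  have := Finset.mem_of_max hM
  simpa [maxPF, hM] using this

lemma le_maxPF {n q : Nat} (hq : q ∈ n.primeFactors) : q ≤ maxPF n := by
  have hne : n.primeFactors.Nonempty := ⟨q, hq⟩
  obtain ⟨M, hM⟩ := Finset.max_of_nonempty hne
  have h1 := Finset.le_max hq
  rw [hM] at h1
  simpa [maxPF, hM] using h1

lemma maxPF_prime_eq {p : Nat} (hp : p.Prime) : maxPF p = p := by
  simp [maxPF, hp.primeFactors, Finset.max_singleton]
  rfl

lemma maxPF_le {n : Nat} (hn : 2 ≤ n) : maxPF n ≤ n :=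
  Nat.le_of_mem_primeFactors (maxPF_mem hn)

-- dividing out the least prime factor keeps the largest one
lemma maxPF_mul {p m : Nat} (hp : p.Prime) (hm : 2 ≤ m)
    (hle : ∀ q ∈ m.primeFactors, p ≤ q) : maxPF (p * m) = maxPF m := by
  have hM := maxPF_mem hm
  have hpM : p ≤ maxPF m := hle _ hM
  have hpf : (p * m).primeFactors = insert p m.primeFactors := by
    rw [Nat.primeFactors_mul hp.ne_zero (by omega), hp.primeFactors]
    ext q; simp
  apply le_antisymm
  · have h1 := maxPF_mem (show 2 ≤ p * m by nlinarith [hp.two_le])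
    rw [hpf] at h1
    rcases Finset.mem_insert.mp h1 with h | h
    · rw [h]; exact hpM
    · exact le_maxPF h
  · exact le_maxPF (by rw [hpf]; exact Finset.mem_insert_of_mem hM)

-- a number with no prime factor below its square root is prime
lemma prime_of_no_small_factor {n i : Nat} (hn : 2 ≤ n)
    (hinv : ∀ q ∈ n.primeFactors, i ≤ q) (hlt : n < i * i) : n.Prime := by
  by_contra h
  have h1 := Nat.minFac_sq_le_self (by omega) h
  have h2 : n.minFac ∈ n.primeFactors :=
    Nat.mem_primeFactors.mpr ⟨Nat.minFac_prime (by omega), Nat.minFac_dvd n, by omega⟩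
  have h3 := hinv _ h2
  have h4 : i * i ≤ n.minFac * n.minFac := Nat.mul_le_mul h3 h3
  have h5 : n.minFac * n.minFac ≤ n := by nlinarith [h1]
  omega

lemma inv_step {n i : Nat} (hnd : ¬ i ∣ n)
    (hinv : ∀ q ∈ n.primeFactors, i ≤ q) : ∀ q ∈ n.primeFactors, i + 1 ≤ q := by
  intro q hq
  rcases Nat.lt_or_ge i q with h | h
  · omega
  · have := hinv q hq
    have hqi : q = i := by omega
    exact absurd (hqi ▸ Nat.dvd_of_mem_primeFactors hq) hnd

lemma prime_of_dvd_inv {n i : Nat} (hi : 2 ≤ i) (hn : 1 ≤ n) (hd : i ∣ n)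
    (hinv : ∀ q ∈ n.primeFactors, i ≤ q) : i.Prime := by
  have hq : i.minFac.Prime := Nat.minFac_prime (by omega)
  have hmem : i.minFac ∈ n.primeFactors :=
    Nat.mem_primeFactors.mpr ⟨hq, (Nat.minFac_dvd i).trans hd, by omega⟩
  have h1 := hinv _ hmem
  have h2 : i.minFac ≤ i := Nat.minFac_le (by omega)
  have h3 : i.minFac = i := by omega
  exact h3 ▸ hq

-- Int/Nat divisibility bridge
lemma dvd_toNat {a b : Int} (ha : 0 ≤ a) (hb : 0 ≤ b) : a ∣ b ↔ a.toNat ∣ b.toNat := by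
  constructor
  · intro h
    exact Int.natCast_dvd_natCast.mp (by rwa [Int.toNat_of_nonneg ha, Int.toNat_of_nonneg hb])
  · intro h
    have := Int.natCast_dvd_natCast.mpr h
    rwa [Int.toNat_of_nonneg ha, Int.toNat_of_nonneg hb] at this

lemma mod_cond {n p : Int} : (PySem.Int.mod n p == 0) = true ↔ p ∣ n := by
  rw [beq_iff_eq]; exact PySem.Int.mod_eq_zero_iff_dvd n p

-- ---- port-A helpers ----

lemma is_prime_iff (x : Int) (h : 3 ≤ x) : is_prime x = true ↔ x.toNat.Prime := by
  have hx1 : x ≠ 1 := by omega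
  have hxn : (x.toNat : Int) = x := Int.toNat_of_nonneg (by omega)
  by_cases h2 : PySem.Int.mod x 2 = 0
  · have hdvd : (2 : Int) ∣ x := (PySem.Int.mod_eq_zero_iff_dvd x 2).mp h2
    have hdvdn : 2 ∣ x.toNat := by
      have : ((2:Nat) : Int) ∣ (x.toNat : Int) := by rw [hxn]; exact_mod_cast hdvd
      exact_mod_cast this
    have hx4 : 4 ≤ x.toNat := by omega
    have hev : is_prime x = false := by unfold is_prime; rw [if_pos (Or.inr h2)]
    rw [hev]
    simp only [Bool.false_eq_true, false_iff]
    intro hp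
    rcases (hp.eq_one_or_self_of_dvd 2 hdvdn) with h' | h' <;> omega
  · by_cases h3 : x = 3
    · subst h3
      have hv : is_prime 3 = true := by decide
      rw [hv]
      simpa using (by norm_num : Nat.Prime 3)
    · have hx5 : 5 ≤ x := by
        rcases Int.lt_or_lt_of_ne (show x ≠ 4 by rintro rfl; exact h2 rfl) with h' | h' <;> omega
      have hx2 : x ≠ 2 := by omega
      have hred : is_prime x =
          !((PySem.List.pyRange 3 ((x.toNat.sqrt : Int) + 1) 1).any
              (fun i => PySem.Int.mod x i == 0)) := by
        unfold is_prime
        rw [if_neg (by tauto), if_neg (by tauto)]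
        cases hany : (PySem.List.pyRange 3 ((x.toNat.sqrt : Int) + 1) 1).any
            (fun i => PySem.Int.mod x i == 0) <;> simp
      rw [hred, Bool.not_eq_eq_eq_not, Bool.not_true, List.any_eq_false]
      constructor
      · intro hnd
        by_contra hnp
        set m := x.toNat.minFac with hm
        have hmp : m.Prime := Nat.minFac_prime (by omega)
        have hsq : m ^ 2 ≤ x.toNat := Nat.minFac_sq_le_self (by omega) hnp
        have hm2 : m ≠ 2 := by
          rintro he
          have h5 : (2:Nat) ∣ x.toNat := he ▸ Nat.minFac_dvd _
          have h6 : ((2:Nat):Int) ∣ (x.toNat : Int) := Int.natCast_dvd_natCast.mpr h5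
          rw [hxn] at h6
          exact h2 ((PySem.Int.mod_eq_zero_iff_dvd x 2).mpr (by exact_mod_cast h6))
        have hm3 : 3 ≤ m := by have := hmp.two_le; omega
        have hmsqrt : m ≤ x.toNat.sqrt := Nat.le_sqrt'.mpr hsq
        have hmem : (m : Int) ∈ PySem.List.pyRange 3 ((x.toNat.sqrt : Int) + 1) 1 := by
          rw [PySem.List.mem_pyRange_one]
          constructor <;> [exact_mod_cast hm3; exact_mod_cast (by omega : (m:Int) < (x.toNat.sqrt : Int) + 1)]
        have hne := hnd _ hmem
        have hdm : (m : Int) ∣ x := by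
          have h7 : ((m:Nat):Int) ∣ (x.toNat:Int) := Int.natCast_dvd_natCast.mpr (Nat.minFac_dvd _)
          rwa [hxn] at h7
        simp only [beq_iff_eq] at hne
        exact absurd ((PySem.Int.mod_eq_zero_iff_dvd x (m:Int)).mpr hdm) (by simpa using hne)
      · intro hp i hi
        rw [PySem.List.mem_pyRange_one] at hi
        simp only [beq_iff_eq]
        intro hmod
        have hdvd : i ∣ x := (PySem.Int.mod_eq_zero_iff_dvd x i).mp hmod
        have hdn : i.toNat ∣ x.toNat := by
          have h8 : (i.toNat : Int) ∣ (x.toNat : Int) := by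
            rw [Int.toNat_of_nonneg (by omega), hxn]; exact hdvd
          exact_mod_cast h8
        have hsl : x.toNat.sqrt < x.toNat := Nat.sqrt_lt_self (by omega)
        have hilt : i.toNat < x.toNat := by
          have h9 : i ≤ (x.toNat.sqrt : Int) := by omega
          omega
        have hi3 : 3 ≤ i.toNat := by omega
        rcases hp.eq_one_or_self_of_dvd _ hdn with h' | h' <;> omega

-- the least prime strictly above p
def nextP (p : Nat) : Nat := Nat.find (Nat.exists_infinite_primes (p + 1))

lemma nextP_prime (p : Nat) : (nextP p).Prime := (Nat.find_spec (Nat.exists_infinite_primes (p + 1))).2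

lemma nextP_gt (p : Nat) : p < nextP p := (Nat.find_spec (Nat.exists_infinite_primes (p + 1))).1

lemma nextP_min {p q : Nat} (hq : q.Prime) (hpq : p < q) : nextP p ≤ q :=
  Nat.find_min' _ ⟨hpq, hq⟩

lemma nextP_le (p : Nat) (hp : 1 ≤ p) : nextP p ≤ 2 * p := by
  obtain ⟨q, hq, h1, h2⟩ := Nat.exists_prime_lt_and_le_two_mul p (by omega)
  exact le_trans (nextP_min hq h1) h2

lemma nextPrimeLoop_eq (f : Nat) : ∀ p : Int, 2 ≤ p → (nextP p.toNat : Int) ≤ p + f →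
    nextPrimeLoop f p = (nextP p.toNat : Int) := by
  induction f with
  | zero =>
    intro p hp hf
    have := nextP_gt p.toNat
    omega
  | succ f ih =>
    intro p hp hf
    have hc3 : (3:Int) ≤ p + 1 := by omega
    have hcn : (p+1).toNat = p.toNat + 1 := by omega
    rw [nextPrimeLoop]
    by_cases hpr : is_prime (p + 1) = true
    · rw [if_pos hpr]
      have hprime : (p+1).toNat.Prime := (is_prime_iff _ hc3).mp hpr
      have h1 : nextP p.toNat ≤ (p+1).toNat := nextP_min hprime (by omega)
      have h2 := nextP_gt p.toNat
      omega
    · rw [if_neg hpr]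
      have hnp : ¬ (p+1).toNat.Prime := fun hh => hpr ((is_prime_iff _ hc3).mpr hh)
      have heq : nextP (p+1).toNat = nextP p.toNat := by
        apply le_antisymm
        · apply nextP_min (nextP_prime p.toNat)
          have h2 := nextP_gt p.toNat
          have h4 : nextP p.toNat ≠ (p+1).toNat := fun hh => hnp (hh ▸ nextP_prime p.toNat)
          omega
        · exact nextP_min (nextP_prime _) (by have := nextP_gt (p+1).toNat; omega)
      rw [ih (p+1) (by omega) (by rw [heq]; omega), heq]

lemma next_prime_eq (p : Int) (h : 2 ≤ p) : next_prime p = (nextP p.toNat : Int) := by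
  unfold next_prime
  apply nextPrimeLoop_eq _ _ h
  have h1 : nextP p.toNat ≤ 2 * p.toNat := nextP_le _ (by omega)
  omega

lemma divideOut_spec (f : Nat) : ∀ (n p : Int) (fs : List Int), 2 ≤ p → p.toNat.Prime → 1 ≤ n →
    (∀ q ∈ n.toNat.primeFactors, p.toNat ≤ q) → n.toNat ≤ f →
    ∃ (n' : Int) (l : List Int),
      divideOut f n p fs = (n', fs ++ l) ∧ 1 ≤ n' ∧ ¬ (p ∣ n') ∧ n'.toNat ∣ n.toNat ∧
      (∀ x ∈ l, x = p) ∧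
      (¬ p ∣ n → n' = n ∧ l = []) ∧
      (p ∣ n → l ≠ [] ∧
        ((n' = 1 ∧ maxPF n.toNat = p.toNat) ∨ (2 ≤ n' ∧ maxPF n'.toNat = maxPF n.toNat))) := by
  induction f with
  | zero => intro n p fs _ _ hn _ hf; omega
  | succ f ih =>
    intro n p fs hp hpp hn hinv hf
    rw [divideOut]
    by_cases hd : p ∣ n
    · rw [if_pos (mod_cond.mpr hd)]
      have hfd : PySem.Int.floordiv n p = n / p := PySem.Int.floordiv_eq_ediv_of_pos (by omega)
      set n₁ := n / p with hn₁
      have hmul : n = p * n₁ := by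
        have := Int.ediv_mul_cancel hd
        rw [← hn₁] at this
        linarith [this]
      have hpos : 1 ≤ n₁ := by nlinarith
      have hlt : n₁ < n := by nlinarith
      have hNmul : n.toNat = p.toNat * n₁.toNat := by
        rw [hmul, Int.toNat_mul (by omega) (by omega)]
      have hdvdN : n₁.toNat ∣ n.toNat := ⟨p.toNat, by rw [hNmul]; ring⟩
      have hinv₁ : ∀ q ∈ n₁.toNat.primeFactors, p.toNat ≤ q := fun q hq =>
        hinv q (Nat.primeFactors_mono hdvdN (by omega) hq)
      obtain ⟨n', l', heq, h1, h2, h3, h4, h5, h6⟩ :=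
        ih n₁ p (fs ++ [p]) hp hpp hpos hinv₁ (by omega)
      refine ⟨n', p :: l', ?_, h1, h2, h3.trans hdvdN, ?_, ?_, ?_⟩
      · rw [hfd, heq]
        simp
      · intro x hx
        rcases List.mem_cons.mp hx with h | h
        · exact h
        · exact h4 x h
      · intro hcon; exact absurd hd hcon
      · intro _
        refine ⟨by simp, ?_⟩
        rcases Nat.lt_or_ge n₁.toNat 2 with hsmall | hbig
        · -- n₁ = 1 : n = p
          have hone : n₁ = 1 := by omega
          have hnp : n.toNat = p.toNat := by rw [hNmul, hone]; simp
          rcases h5 (by rw [hone]; intro hcc; have := Int.le_of_dvd (by omega) hcc; omega) with ⟨he1, _⟩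
          exact Or.inl ⟨by rw [he1, hone], by rw [hnp]; exact maxPF_prime_eq hpp⟩
        · -- n₁ ≥ 2 : maxPF n = maxPF n₁
          have hmm : maxPF n.toNat = maxPF n₁.toNat := by
            rw [hNmul]; exact maxPF_mul hpp hbig hinv₁
          by_cases hd₁ : p ∣ n₁
          · rcases h6 hd₁ with ⟨_, hdisj⟩
            rcases hdisj with ⟨ha, hb⟩ | ⟨ha, hb⟩
            · exact Or.inl ⟨ha, by rw [hmm]; exact hb⟩
            · exact Or.inr ⟨ha, by rw [hmm]; exact hb⟩
          · rcases h5 hd₁ with ⟨he1, _⟩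
            refine Or.inr ⟨by omega, ?_⟩
            rw [he1, hmm]
    · rw [if_neg (fun hc => hd (mod_cond.mp hc))]
      exact ⟨n, [], by simp, hn, hd, dvd_refl _, by simp, fun _ => ⟨rfl, rfl⟩,
        fun hc => absurd hc hd⟩

lemma maxLoop_one (f : Nat) (p : Int) (fs : List Int) : maxLoop f 1 p fs = fs := by
  cases f <;> simp [maxLoop]

lemma maxLoop_spec (f : Nat) : ∀ (n p : Int) (fs : List Int), 2 ≤ n → 2 ≤ p → p.toNat.Prime →
    (∀ q ∈ n.toNat.primeFactors, p.toNat ≤ q) → maxPF n.toNat + 2 ≤ f + p.toNat →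
    ∃ l, maxLoop f n p fs = fs ++ l ∧ l.getLast? = some (maxPF n.toNat : Int) := by
  induction f with
  | zero =>
    intro n p fs hn hp _ hinv hf
    have h1 : p.toNat ≤ maxPF n.toNat := hinv _ (maxPF_mem (by omega))
    omega
  | succ f ih =>
    intro n p fs hn hp hpp hinv hf
    obtain ⟨n', l₀, heq, h1, h2, h3, h4, h5, h6⟩ :=
      divideOut_spec n.toNat n p fs hp hpp (by omega) hinv (le_refl _)
    rw [maxLoop, if_pos (by omega : n > 1)]
    simp only [heq]
    have hnp' := next_prime_eq p hp
    have hp'2 : (2:Int) ≤ next_prime p := by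
      rw [hnp']
      have := (nextP_prime p.toNat).two_le
      omega
    have hp'toNat : (next_prime p).toNat = nextP p.toNat := by rw [hnp']; omega
    have hp'prime : (next_prime p).toNat.Prime := by rw [hp'toNat]; exact nextP_prime _
    have hp'gt : p.toNat < (next_prime p).toNat := by rw [hp'toNat]; exact nextP_gt _
    by_cases hd : p ∣ n
    · rcases h6 hd with ⟨hl₀, hdisj⟩
      rcases hdisj with ⟨he1, hmax⟩ | ⟨hn'2, hmax⟩
      · -- cofactor 1: remaining loop is a no-op
        rw [he1, maxLoop_one]
        refine ⟨l₀, rfl, ?_⟩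
        cases hl : l₀.getLast? with
        | none => rw [List.getLast?_eq_none_iff] at hl; exact absurd hl hl₀
        | some x =>
          have hx : x ∈ l₀ := List.mem_of_getLast? hl
          rw [h4 x hx, hmax, Int.toNat_of_nonneg (by omega)]
      · -- recurse on the cofactor
        have hinv' : ∀ q ∈ n'.toNat.primeFactors, (next_prime p).toNat ≤ q := by
          intro q hq
          have hqn : q ∈ n.toNat.primeFactors := Nat.primeFactors_mono h3 (by omega) hq
          have hge : p.toNat ≤ q := hinv _ hqn
          have hne : q ≠ p.toNat := by
            rintro rfl
            exact h2 ((dvd_toNat (by omega) (by omega)).mpr (Nat.dvd_of_mem_primeFactors hq))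
          rw [hp'toNat]
          exact nextP_min (Nat.prime_of_mem_primeFactors hq) (by omega)
        obtain ⟨l₁, heq₁, hlast₁⟩ := ih n' (next_prime p) (fs ++ l₀) hn'2 hp'2 hp'prime hinv'
          (by rw [hmax] at *; omega)
        refine ⟨l₀ ++ l₁, by rw [heq₁]; simp, ?_⟩
        have hl₁ : l₁ ≠ [] := by
          intro hc; rw [hc] at hlast₁; simp at hlast₁
        rw [List.getLast?_append_of_ne_nil l₀ hl₁, hlast₁, hmax]
    · obtain ⟨he, hl⟩ := h5 hd
      rw [he, hl]
      have hinv' : ∀ q ∈ n.toNat.primeFactors, (next_prime p).toNat ≤ q := by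
        intro q hq
        have hge : p.toNat ≤ q := hinv _ hq
        have hne : q ≠ p.toNat := by
          rintro rfl
          exact hd ((dvd_toNat (by omega) (by omega)).mpr (Nat.dvd_of_mem_primeFactors hq))
        rw [hp'toNat]
        exact nextP_min (Nat.prime_of_mem_primeFactors hq) (by omega)
      obtain ⟨l₁, heq₁, hlast₁⟩ := ih n (next_prime p) (fs ++ []) hn hp'2 hp'prime hinv' (by omega)
      exact ⟨l₁, by rw [heq₁]; simp, hlast₁⟩

-- ---- port-B main lemma ----

lemma altLoop_eq (f : Nat) : ∀ (n i largest : Int), 2 ≤ i → 2 ≤ n →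
    (∀ q ∈ n.toNat.primeFactors, i.toNat ≤ q) → n.toNat + 2 ≤ f + i.toNat →
    altLoop f n i largest = (maxPF n.toNat : Int) := by
  induction f with
  | zero =>
    intro n i largest hi hn hinv hf
    have hprime : n.toNat.Prime := by
      apply prime_of_no_small_factor (by omega) hinv
      have h1 : n.toNat < i.toNat := by omega
      nlinarith [h1]
    rw [altLoop, if_pos (by omega : n > 1), maxPF_prime_eq hprime]
    omega
  | succ f ih =>
    intro n i largest hi hn hinv hf
    rw [altLoop]
    by_cases hgi : i * i ≤ n
    · rw [if_pos hgi]
      by_cases hd : i ∣ n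
      · rw [if_pos (mod_cond.mpr hd)]
        have hfd : PySem.Int.floordiv n i = n / i := PySem.Int.floordiv_eq_ediv_of_pos (by omega)
        set n₁ := n / i with hn₁
        have hmul : n = i * n₁ := by
          have := Int.ediv_mul_cancel hd
          rw [← hn₁] at this
          linarith [this]
        have hge : i ≤ n₁ := by nlinarith
        have hlt : n₁ < n := by nlinarith
        have hNmul : n.toNat = i.toNat * n₁.toNat := by
          rw [hmul, Int.toNat_mul (by omega) (by omega)]
        have hdvdN : n₁.toNat ∣ n.toNat := ⟨i.toNat, by rw [hNmul]; ring⟩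
        have hinv₁ : ∀ q ∈ n₁.toNat.primeFactors, i.toNat ≤ q := fun q hq =>
          hinv q (Nat.primeFactors_mono hdvdN (by omega) hq)
        have hip : i.toNat.Prime :=
          prime_of_dvd_inv (by omega) (by omega) ((dvd_toNat (by omega) (by omega)).mp hd) hinv
        rw [hfd, ih n₁ i i hi (by omega) hinv₁ (by omega)]
        congr 1
        rw [hNmul]
        exact (maxPF_mul hip (by omega) hinv₁).symm
      · rw [if_neg (fun hc => hd (mod_cond.mp hc))]
        apply ih n (i+1) largest (by omega) hn
        · have hstep := inv_step (fun hc => hd ((dvd_toNat (by omega) (by omega)).mpr hc)) hinv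
          intro q hq
          have := hstep q hq
          omega
        · omega
    · rw [if_neg hgi, if_pos (by omega : n > 1)]
      have hlt : n.toNat < i.toNat * i.toNat := by
        have hii : ((i.toNat * i.toNat : Nat) : Int) = i * i := by
          push_cast [Int.toNat_of_nonneg (by omega : (0:Int) ≤ i)]
          ring
        omega
      rw [maxPF_prime_eq (prime_of_no_small_factor (by omega) hinv hlt)]
      omega

lemma pyGet_neg_one {l : List Int} (x : Int) (h : l.getLast? = some x) :
    PySem.List.pyGet? l (-1) = some x := by
  have hl : l ≠ [] := by rintro rfl; simp at h
  have hlen : 1 ≤ l.length := by cases l <;> simp_all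
  simp [PySem.List.pyGet?, PySem.List.pyIdx?, hlen]
  rwa [← List.getLast?_eq_getElem?]

-- ===== VERDICT (by name: the statement is the Claim_ definition above) =====
theorem max_factor_spec : Claim_equal_max_factor := by
  intro number _ hpre
  unfold Pre_max_factor at hpre
  unfold Spec_max_factor max_factor max_factor_alt
  have hn2 : 2 ≤ number.toNat := by omega
  have hinv2 : ∀ q ∈ number.toNat.primeFactors, (2:Int).toNat ≤ q := by
    intro q hq
    exact (Nat.prime_of_mem_primeFactors hq).two_le
  obtain ⟨l, heq, hlast⟩ := maxLoop_spec (number.toNat + 2) number 2 [] (by omega) (by omega)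
    (by decide) hinv2 (by have := maxPF_le hn2; omega)
  rw [heq]
  simp only [List.nil_append]
  rw [pyGet_neg_one _ hlast]
  rw [altLoop_eq (number.toNat + 2) number 2 1 (by omega) (by omega) hinv2 (by omega)]
  rfl
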